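-- pv_equiv track=rewrite | github.com/MauroSon/DataStructure-UnB | Quest01[Recursion].py | drink
-- ===== SOURCE A (Python) =====
-- def drink(i,cont):
--     if i==1:
--         return cont
--     else:
--         if i==2:
--             return drink(i+1,cont)
--         else:
--             return drink(i//3+i%3,cont+i//3)
-- ===== SOURCE B (Python) =====
-- def drink(i, cont):
--     # Closed form: each exchange round adds i//3 to cont and the 2->3 freebie
--     # makes the whole cascade equal floor(i/2) extra bottles in total.
--     return cont + i // 2
-- ===== Notes on version B (the rewrite author's own statement) =====
-- stated objective: simpler
-- what changed: Replaces the exchange-cascade recursion by the closed form cont + i//2, proved equal on all inputs where A terminates.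
-- crash fix: On even i <= 0 (e.g. i=0) A recurses forever and raises RecursionError; B returns cont + i//2 there. — e.g. on drink(0, 5): A raises RecursionError, B returns 5
import Mathlib
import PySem

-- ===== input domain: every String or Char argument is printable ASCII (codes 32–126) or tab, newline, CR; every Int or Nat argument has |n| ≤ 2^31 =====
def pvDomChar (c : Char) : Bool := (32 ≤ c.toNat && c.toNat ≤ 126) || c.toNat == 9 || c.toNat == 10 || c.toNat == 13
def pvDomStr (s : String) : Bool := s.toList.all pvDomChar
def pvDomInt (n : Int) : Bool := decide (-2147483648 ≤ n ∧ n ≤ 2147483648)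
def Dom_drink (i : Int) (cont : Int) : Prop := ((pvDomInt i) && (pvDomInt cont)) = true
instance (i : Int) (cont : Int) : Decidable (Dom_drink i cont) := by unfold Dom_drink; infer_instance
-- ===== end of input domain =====

-- B replaces A's exchange-cascade recursion by the closed form cont + i//2 (objective: simpler).

-- ===== PORT A =====
-- termination measure for A's recursion (2 jumps up to 3; odd negatives climb toward 1)
def drinkMeasure (i : Int) : Nat :=
  if i = 2 then 7 else if 1 ≤ i then (2 * i).toNat else (2 - i).toNat

def drink (i : Int) (cont : Int) : Int :=
  -- totality guard: on even i ≤ 0 the Python recursion diverges (RecursionError); these inputs are outside Pre_drink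
  if i ≤ 0 ∧ i % 2 = 0 then cont
  else if i = 1 then cont
  else if i = 2 then drink (i + 1) cont
  else drink (PySem.Int.floordiv i 3 + PySem.Int.mod i 3) (cont + PySem.Int.floordiv i 3)
termination_by drinkMeasure i
decreasing_by
  · simp only [drinkMeasure]; split_ifs <;> omega
  · rw [PySem.Int.floordiv_eq_ediv_of_pos (by norm_num), PySem.Int.mod_eq_emod_of_pos (by norm_num)]
    simp only [drinkMeasure]; split_ifs <;> omega

-- ===== PORT B =====
def drink_alt (i : Int) (cont : Int) : Int := cont + PySem.Int.floordiv i 2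

-- ===== PRECONDITION & SPEC =====
-- Pre_drink admits exactly the inputs where Python A terminates: i ≥ 1 or i odd
-- (on even i ≤ 0 the recursion never reaches 1 and A raises RecursionError).
def Pre_drink (i : Int) (cont : Int) : Prop := 1 ≤ i ∨ i % 2 = 1
instance (i : Int) (cont : Int) : Decidable (Pre_drink i cont) := by unfold Pre_drink; infer_instance
def pvWitness_drink : Int × Int := (7, 0)

-- On even i ≤ 0 (e.g. i = 0) A recurses forever and raises RecursionError; B returns cont + i//2.
def Raises_drink (i : Int) (cont : Int) : Prop := i ≤ 0 ∧ i % 2 = 0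
instance (i : Int) (cont : Int) : Decidable (Raises_drink i cont) := by unfold Raises_drink; infer_instance
def pvRaiseWitness_drink : Int × Int := (0, 5)
def pvRaiseWitnessOut_drink : Int := 5

def Spec_drink (i : Int) (cont : Int) (out : Int) : Prop := out = drink_alt i cont
instance (i : Int) (cont : Int) (out : Int) : Decidable (Spec_drink i cont out) := by unfold Spec_drink; infer_instance

-- ===== CLAIM (what is proved, stated in full; the proofs are below) =====
def Claim_equal_drink : Prop := ∀ (i : Int) (cont : Int), Dom_drink i cont → Pre_drink i cont → Spec_drink i cont (drink i cont)
def Claim_raises_drink : Prop := (∀ (i : Int) (cont : Int), Dom_drink i cont → Raises_drink i cont → ¬ Pre_drink i cont) ∧ (Dom_drink (pvRaiseWitness_drink.1) (pvRaiseWitness_drink.2) ∧ Raises_drink (pvRaiseWitness_drink.1) (pvRaiseWitness_drink.2) ∧ drink_alt (pvRaiseWitness_drink.1) (pvRaiseWitness_drink.2) = pvRaiseWitnessOut_drink)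

-- ===== LEMMAS AND PROOFS =====
theorem drink_eq_closed (i : Int) (cont : Int) (h : 1 ≤ i ∨ i % 2 = 1) :
    drink i cont = cont + i / 2 := by
  fun_induction drink i cont with
  | case1 i cont hg => omega
  | case2 i cont => omega
  | case3 i cont h2 ih =>
    rw [ih (by omega)]; omega
  | case4 i cont hg h1 h3 ih =>
    rw [PySem.Int.floordiv_eq_ediv_of_pos (by norm_num),
        PySem.Int.mod_eq_emod_of_pos (by norm_num)] at ih ⊢
    rw [ih (by omega)]; omega

-- ===== VERDICT (by name: the statement is the Claim_ definition above) =====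
theorem drink_spec : Claim_equal_drink := by
  intro i cont _ hp
  unfold Spec_drink drink_alt
  rw [PySem.Int.floordiv_eq_ediv_of_pos (by norm_num)]
  exact drink_eq_closed i cont hp

@[simp] theorem drink_raises : Claim_raises_drink := by
  unfold Claim_raises_drink
  exact ⟨fun i cont _ hr => by unfold Raises_drink Pre_drink at *; omega, by decide⟩
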